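-- pv_equiv track=rewrite | github.com/PrincceMH/DeteccionVulnerabilidades | modules/taint_analysis/taint_analyzer.py | _identify_entry_points
-- ===== SOURCE A (Python) =====
-- from typing import Dict, List, Any, Set, Tuple
--
-- def _identify_entry_points(
--
--     manifest: Dict[str, Any],
--     cfg: Dict[str, Any]
-- ) -> List[str]:
--     """
--     Identifica puntos de entrada de la aplicación
--     - Lifecycle callbacks
--     - Componentes exportados
--     - Intent handlers
--     """
--     entry_points = []
--
--     # Activities
--     for activity in manifest.get('activities', []):
--         entry_points.extend([
--             f"{activity}.onCreate",
--             f"{activity}.onStart",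
--             f"{activity}.onResume"
--         ])
--
--     # Services
--     for service in manifest.get('services', []):
--         entry_points.extend([
--             f"{service}.onCreate",
--             f"{service}.onStartCommand"
--         ])
--
--     # BroadcastReceivers
--     for receiver in manifest.get('receivers', []):
--         entry_points.append(f"{receiver}.onReceive")
--
--     return entry_points
-- ===== SOURCE B (Python) =====
-- def _identify_entry_points(manifest, cfg):
--     """Recursive decomposition: the result list is constructed back-to-front by
--     consing each component's callback block onto an explicitly passed tail,
--     instead of appending to a growing accumulator."""
--     def attach(components, suffixes, tail):
--         # cons the callbacks of each component onto `tail`, right to left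
--         if not components:
--             return tail
--         head, rest = components[0], components[1:]
--         return [head + "." + s for s in suffixes] + attach(rest, suffixes, tail)
--
--     def build(groups):
--         if not groups:
--             return []
--         (comps, sufs) = groups[0]
--         return attach(comps, sufs, build(groups[1:]))
--
--     return build([
--         (manifest.get('activities', []), ['onCreate', 'onStart', 'onResume']),
--         (manifest.get('services', []), ['onCreate', 'onStartCommand']),
--         (manifest.get('receivers', []), ['onReceive']),
--     ])
-- ===== Notes on version B (the rewrite author's own statement) =====
-- stated objective: alternative
-- what changed: Replaces A's imperative accumulator (three loops each appending to a shared entry_points list) with a recursive construction that builds the result back-to-front, consing each component's callback block onto an explicitly passed tail.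
import Mathlib
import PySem

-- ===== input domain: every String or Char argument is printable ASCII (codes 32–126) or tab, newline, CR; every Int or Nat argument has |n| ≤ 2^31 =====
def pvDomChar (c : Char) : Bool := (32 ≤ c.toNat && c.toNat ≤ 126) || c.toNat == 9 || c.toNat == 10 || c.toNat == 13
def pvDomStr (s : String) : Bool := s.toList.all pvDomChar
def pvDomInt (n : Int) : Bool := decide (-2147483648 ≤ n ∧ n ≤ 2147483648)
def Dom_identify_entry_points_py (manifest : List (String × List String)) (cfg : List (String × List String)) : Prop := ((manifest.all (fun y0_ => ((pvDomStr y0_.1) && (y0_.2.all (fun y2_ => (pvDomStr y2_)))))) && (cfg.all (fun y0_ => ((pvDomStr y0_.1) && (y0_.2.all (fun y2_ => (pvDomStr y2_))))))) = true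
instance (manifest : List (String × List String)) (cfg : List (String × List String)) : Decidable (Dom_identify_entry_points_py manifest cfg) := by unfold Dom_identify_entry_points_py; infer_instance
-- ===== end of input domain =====

-- B replaces A's accumulator loops by a recursive back-to-front construction consing onto an explicit tail (objective: alternative).

-- ===== PORT A =====
-- manifest.get(key, []) on the association list: first-match lookup, default []
def pvGet (m : List (String × List String)) (k : String) : List String :=
  match m with
  | [] => []
  | (k', v) :: t => if k' == k then v else pvGet t k

def identify_entry_points_py (manifest : List (String × List String)) (cfg : List (String × List String)) : List String :=
  -- entry_points = []; three loops extending/appending, exactly as in A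
  let ep : List String := []
  let ep := (pvGet manifest "activities").foldl
    (fun acc activity => acc ++ [activity ++ ".onCreate", activity ++ ".onStart", activity ++ ".onResume"]) ep
  let ep := (pvGet manifest "services").foldl
    (fun acc service => acc ++ [service ++ ".onCreate", service ++ ".onStartCommand"]) ep
  let ep := (pvGet manifest "receivers").foldl
    (fun acc receiver => acc ++ [receiver ++ ".onReceive"]) ep
  ep

-- ===== PORT B =====
-- attach: cons each component's callback block onto the tail, right to left
def pvAttach (components suffixes tail : List String) : List String :=
  match components with
  | [] => tail
  | head :: rest => (suffixes.map (fun s => head ++ "." ++ s)) ++ pvAttach rest suffixes tail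

-- build: recursion over the group list, the rest's result is the tail
def pvBuild (groups : List (List String × List String)) : List String :=
  match groups with
  | [] => []
  | g :: rest => pvAttach g.1 g.2 (pvBuild rest)

def identify_entry_points_py_alt (manifest : List (String × List String)) (cfg : List (String × List String)) : List String :=
  pvBuild [
    (pvGet manifest "activities", ["onCreate", "onStart", "onResume"]),
    (pvGet manifest "services", ["onCreate", "onStartCommand"]),
    (pvGet manifest "receivers", ["onReceive"])]

-- ===== PRECONDITION & SPEC =====
def Spec_identify_entry_points_py (manifest : List (String × List String)) (cfg : List (String × List String)) (out : List String) : Prop := out = identify_entry_points_py_alt manifest cfg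
instance (manifest : List (String × List String)) (cfg : List (String × List String)) (out : List String) : Decidable (Spec_identify_entry_points_py manifest cfg out) := by unfold Spec_identify_entry_points_py; infer_instance

-- ===== CLAIM (what is proved, stated in full; the proofs are below) =====
def Claim_equal_identify_entry_points_py : Prop := ∀ (manifest : List (String × List String)) (cfg : List (String × List String)), Dom_identify_entry_points_py manifest cfg → Spec_identify_entry_points_py manifest cfg (identify_entry_points_py manifest cfg)

-- ===== LEMMAS AND PROOFS =====
theorem pvAttach_eq_flatMap (components suffixes tail : List String) :
    pvAttach components suffixes tail
      = components.flatMap (fun c => suffixes.map (fun s => c ++ "." ++ s)) ++ tail := by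
  induction components with
  | nil => simp [pvAttach]
  | cons h t ih => simp [pvAttach, ih]

theorem identify_entry_points_eq (manifest cfg : List (String × List String)) :
    identify_entry_points_py manifest cfg = identify_entry_points_py_alt manifest cfg := by
  simp only [identify_entry_points_py, identify_entry_points_py_alt, pvBuild,
    pvAttach_eq_flatMap, PySem.List.foldl_append_eq_flatMap,
    List.append_nil, List.nil_append, List.append_assoc]
  congr 1
  · apply List.flatMap_congr; intro a _; simp [String.append_assoc]
  congr 1
  · apply List.flatMap_congr; intro a _; simp [String.append_assoc]
  · apply List.flatMap_congr; intro a _; simp [String.append_assoc]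

-- ===== VERDICT (by name: the statement is the Claim_ definition above) =====
theorem identify_entry_points_py_spec : Claim_equal_identify_entry_points_py := by
  intro manifest cfg _
  exact identify_entry_points_eq manifest cfg
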